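-- pv_equiv track=rewrite | github.com/Insta-Bids-System/instabids-v2 | ai-agents/agents/cda/adaptive_discovery.py | get_search_terms_for_stage
-- ===== SOURCE A (Python) =====
-- from typing import Dict, Any, List, Optional
--
-- def get_search_terms_for_stage(base_terms: List[str], stage: int) -> List[str]:
--     """
--     Adjust search terms based on expansion stage
--
--     Args:
--         base_terms: Base search terms
--         stage: Expansion stage (1-5)
--
--     Returns:
--         Modified search terms
--     """
--     if stage == 1:
--         # Initial search - be specific
--         return base_terms
--     elif stage == 2:
--         # Add "near me" variants
--         expanded = base_terms.copy()
--         expanded.extend([f"{term} near me" for term in base_terms[:3]])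
--         return expanded
--     elif stage == 3:
--         # Add regional terms
--         expanded = base_terms.copy()
--         expanded.extend([f"best {term}" for term in base_terms[:3]])
--         expanded.extend([f"top rated {term}" for term in base_terms[:2]])
--         return expanded
--     elif stage >= 4:
--         # Broader terms
--         expanded = base_terms.copy()
--         expanded.extend([f"professional {term}" for term in base_terms[:2]])
--         expanded.extend([f"licensed {term}" for term in base_terms[:2]])
--         expanded.append("general contractor")
--         expanded.append("home improvement")
--         return expanded
--
--     return base_terms
-- ===== SOURCE B (Python) =====
-- # Dispatch-table reformulation: stage -> (list of (prefix, suffix, take-count) specs, literal tail)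
-- _RULES = {
--     2: ([("", " near me", 3)], []),
--     3: ([("best ", "", 3), ("top rated ", "", 2)], []),
--     4: ([("professional ", "", 2), ("licensed ", "", 2)],
--         ["general contractor", "home improvement"]),
-- }
--
--
-- def get_search_terms_for_stage(base_terms, stage):
--     spec = _RULES.get(min(stage, 4))
--     if spec is None:
--         return base_terms
--     specs, tail = spec
--     out = base_terms.copy()
--     for pre, suf, count in specs:
--         out.extend(pre + t + suf for t in base_terms[:count])
--     out.extend(tail)
--     return out
-- ===== Notes on version B (the rewrite author's own statement) =====
-- stated objective: simpler
-- what changed: Replaces the if/elif chain of hand-written per-stage expansions with a single data-driven dispatch table mapping min(stage,4) to (prefix,suffix,count) specs plus a literal tail, applied by one generic loop.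
import Mathlib
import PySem

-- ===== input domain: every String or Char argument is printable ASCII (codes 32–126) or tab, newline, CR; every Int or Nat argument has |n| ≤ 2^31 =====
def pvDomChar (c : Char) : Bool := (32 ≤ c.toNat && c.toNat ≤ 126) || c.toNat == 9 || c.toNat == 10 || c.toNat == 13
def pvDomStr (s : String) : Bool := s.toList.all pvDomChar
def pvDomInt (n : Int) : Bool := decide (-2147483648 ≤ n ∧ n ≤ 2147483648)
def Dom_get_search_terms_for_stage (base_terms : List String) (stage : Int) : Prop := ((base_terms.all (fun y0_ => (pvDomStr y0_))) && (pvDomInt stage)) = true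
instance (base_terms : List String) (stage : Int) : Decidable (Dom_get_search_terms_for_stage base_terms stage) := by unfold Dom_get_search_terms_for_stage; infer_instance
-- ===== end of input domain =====

-- B replaces A's if/elif chain by a dispatch table (stage -> (prefix,suffix,count) specs + tail) applied by one generic loop; objective: simpler.
-- ===== PORT A =====
def get_search_terms_for_stage (base_terms : List String) (stage : Int) : List String :=
  if stage == 1 then base_terms
  else if stage == 2 then
    base_terms ++ (base_terms.take 3).map (fun term => term ++ " near me")
  else if stage == 3 then
    base_terms ++ (base_terms.take 3).map (fun term => "best " ++ term)
      ++ (base_terms.take 2).map (fun term => "top rated " ++ term)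
  else if stage ≥ 4 then
    base_terms ++ (base_terms.take 2).map (fun term => "professional " ++ term)
      ++ (base_terms.take 2).map (fun term => "licensed " ++ term)
      ++ ["general contractor"] ++ ["home improvement"]
  else base_terms

-- ===== PORT B =====
-- the dispatch table _RULES of Source B, as an association list (PySem.Dict semantics: first match)
def pvRules : PySem.Dict Int (List (String × String × Int) × List String) :=
  PySem.Dict.ofList
    [(2, ([("", " near me", 3)], [])),
     (3, ([("best ", "", 3), ("top rated ", "", 2)], [])),
     (4, ([("professional ", "", 2), ("licensed ", "", 2)],
          ["general contractor", "home improvement"]))]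

def get_search_terms_for_stage_alt (base_terms : List String) (stage : Int) : List String :=
  match pvRules.get? (min stage 4) with
  | none => base_terms
  | some (specs, tail) =>
      (specs.foldl
        (fun out s => out ++ (base_terms.take s.2.2.toNat).map (fun t => s.1 ++ t ++ s.2.1))
        base_terms) ++ tail

-- ===== PRECONDITION & SPEC =====
def Spec_get_search_terms_for_stage (base_terms : List String) (stage : Int) (out : List String) : Prop := out = get_search_terms_for_stage_alt base_terms stage
instance (base_terms : List String) (stage : Int) (out : List String) : Decidable (Spec_get_search_terms_for_stage base_terms stage out) := by unfold Spec_get_search_terms_for_stage; infer_instance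

-- ===== CLAIM (what is proved, stated in full; the proofs are below) =====
def Claim_equal_get_search_terms_for_stage : Prop := ∀ (base_terms : List String) (stage : Int), Dom_get_search_terms_for_stage base_terms stage → Spec_get_search_terms_for_stage base_terms stage (get_search_terms_for_stage base_terms stage)

-- ===== LEMMAS AND PROOFS =====

-- ===== VERDICT (by name: the statement is the Claim_ definition above) =====
theorem get_search_terms_for_stage_spec : Claim_equal_get_search_terms_for_stage := by
  intro base_terms stage _
  unfold Spec_get_search_terms_for_stage get_search_terms_for_stage get_search_terms_for_stage_alt
  by_cases h1 : stage = 1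
  · subst h1
    have hget : pvRules.get? (1:Int) = none := by rfl
    simp [hget]
  · by_cases h2 : stage = 2
    · subst h2
      have hget : pvRules.get? (2:Int) = some ([("", " near me", 3)], []) := by rfl
      simp [hget]
    · by_cases h3 : stage = 3
      · subst h3
        have hget : pvRules.get? (3:Int) =
            some ([("best ", "", 3), ("top rated ", "", 2)], []) := by rfl
        simp [hget]
      · by_cases h4 : stage ≥ 4
        · have hm : min stage 4 = 4 := by omega
          have hget : pvRules.get? (4:Int) =
              some ([("professional ", "", 2), ("licensed ", "", 2)],
                    ["general contractor", "home improvement"]) := by rfl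
          simp [h1, h2, h3, h4, hget]
        · have hm : min stage 4 = stage := by omega
          have hmk : pvRules = PySem.Dict.mk
              [(2, ([("", " near me", 3)], [])),
               (3, ([("best ", "", 3), ("top rated ", "", 2)], [])),
               (4, ([("professional ", "", 2), ("licensed ", "", 2)],
                    ["general contractor", "home improvement"]))] := by rfl
          have e2 : ((2:Int) == stage) = false := by simp; omega
          have e3 : ((3:Int) == stage) = false := by simp; omega
          have e4 : ((4:Int) == stage) = false := by simp; omega
          have hnone : pvRules.get? stage = none := by
            rw [hmk]
            simp [e2, e3, e4, PySem.Dict.get?]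
          simp [h1, h2, h3, h4, hm, hnone]
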